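-- pv_equiv track=rewrite | github.com/JakeHuneau/ProjectEuler | PE51.py | find_all_replacements
-- ===== SOURCE A (Python) =====
-- from itertools import product
--
-- def all_locations(num_spots):
--     # For example: for num_spots = 3, we have ###. So we can have *##, **#, *#*, #*#, #**, ##*
--     # Return set of tuples of len = num_spots with T/F values
--     locs = []
--     for i in product([True, False], repeat=num_spots):
--         if not all(i):
--             locs.append(i)
--     return locs
--
-- def find_all_replacements(n):
--     n_str = str(n)
--     all_replacements = []
--     replacement_locs = all_locations(len(n_str))
--     for i in replacement_locs:
--         curr_config = set()
--         for n in range(10):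
--             curr_str = [s for s in n_str]
--             for j in range(len(i)):
--                 if i[j]:
--                     curr_str[j] = str(n)
--             curr_config.add(int(''.join(curr_str)))
--         all_replacements.append(curr_config)
--     return all_replacements
-- ===== SOURCE B (Python) =====
-- from itertools import product
--
-- def find_all_replacements(n):
--     # One arithmetic pass per mask: base (unmasked digits in place) and
--     # M (sum of powers of ten at masked places) give the family as base + d*M.
--     s = str(n)
--     families = []
--     for mask in product([True, False], repeat=len(s)):
--         if all(mask):
--             continue
--         base = M = 0
--         for b, c in zip(mask, s):
--             if b:
--                 base, M = 10 * base, 10 * M + 1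
--             else:
--                 base, M = 10 * base + int(c), 10 * M
--         families.append({base + d * M for d in range(10)})
--     return families
-- ===== Notes on version B (the rewrite author's own statement) =====
-- stated objective: alternative
-- what changed: Per mask, B makes one arithmetic pass over str(n) computing base (unmasked digits in place) and M (sum of the powers of ten at the masked places) and emits the family as {base + d*M for d in range(10)}, instead of rebuilding a character list and re-parsing it with int() for every replacement digit; Pre_ excludes negative n, where A masks positions of the '-' sign character itself and B's int(c) on the sign raises ValueError.
import Mathlib
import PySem

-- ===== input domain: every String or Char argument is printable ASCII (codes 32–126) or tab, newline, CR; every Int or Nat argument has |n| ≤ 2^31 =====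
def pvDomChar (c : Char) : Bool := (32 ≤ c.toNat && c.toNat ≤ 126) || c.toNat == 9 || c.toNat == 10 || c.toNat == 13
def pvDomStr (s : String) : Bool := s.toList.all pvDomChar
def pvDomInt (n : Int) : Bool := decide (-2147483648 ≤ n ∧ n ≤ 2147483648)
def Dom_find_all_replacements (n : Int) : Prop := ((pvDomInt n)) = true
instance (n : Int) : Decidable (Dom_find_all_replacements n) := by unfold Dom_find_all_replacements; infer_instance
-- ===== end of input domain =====

-- Alternative implementation: per mask, B computes the family arithmetically as base + d*M in one digit pass,
-- instead of A's per-digit char-list rebuild and int() re-parse. Pre_ restricts to n ≥ 0 (B raises on '-').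


-- ===== PORT A =====
-- itertools.product([True, False], repeat=k), in Python's tuple order (hand port; exact)
def prodTF : Nat → List (List Bool)
  | 0 => [[]]
  | k + 1 => [true, false].flatMap (fun x => (prodTF k).map (fun t => x :: t))

def all_locations (num_spots : Nat) : List (List Bool) :=
  (prodTF num_spots).foldl (fun locs i => if !(i.all id) then locs ++ [i] else locs) []

def digitsVal (cs : List Char) : Int := cs.foldl (fun a c => 10 * a + ((c.toNat : Int) - 48)) 0

-- int(''.join(curr_str)) port: exact for the strings formed here (an optional leading '-'
-- followed by one or more decimal digit characters — what the masked rewrite of str(n) always yields)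
def pyIntDigits (cs : List Char) : Int :=
  if cs.headD ' ' = '-' then -(digitsVal (cs.drop 1)) else digitsVal cs

def find_all_replacements (n : Int) : List (List Int) :=
  let n_str := PySem.Int.toChars n
  let replacement_locs := all_locations n_str.length
  replacement_locs.foldl (fun all_replacements i =>
    let curr_config : PySem.Set Int :=
      (PySem.List.pyRange 0 10).foldl (fun cfg d =>
        let curr_str : List (List Char) := n_str.map (fun s => [s])
        let curr_str := (PySem.List.pyRange 0 (i.length : Int)).foldl
          (fun cs j => if PySem.List.pyGetD i j false
            then PySem.List.pySetD cs j (PySem.Int.toChars d) else cs) curr_str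
        PySem.Set.add cfg (pyIntDigits (PySem.Chars.join [] curr_str)))
        PySem.Set.empty
    all_replacements ++ [curr_config]) []

-- ===== PORT B =====
-- int(c) is ported as c.toNat - 48: exact for the decimal digit characters str(n) consists of on Pre_ (n ≥ 0)
def find_all_replacements_alt (n : Int) : List (List Int) :=
  let s := PySem.Int.toChars n
  (prodTF s.length).foldl (fun families mask =>
    if mask.all id then families
    else
      let bm := (mask.zip s).foldl
        (fun p bc => if bc.1 then (10 * p.1, 10 * p.2 + 1)
                     else (10 * p.1 + ((bc.2.toNat : Int) - 48), 10 * p.2))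
        ((0 : Int), (0 : Int))
      let fam : PySem.Set Int := (PySem.List.pyRange 0 10).foldl
        (fun f d => PySem.Set.add f (bm.1 + d * bm.2)) PySem.Set.empty
      families ++ [fam]) []

-- ===== PRECONDITION & SPEC =====
-- Pre_ excludes negative n: there A masks positions of the '-' sign character itself (an accident of
-- iterating over str(n)), and B's int(c) on the sign character raises ValueError.
def Pre_find_all_replacements (n : Int) : Prop := 0 ≤ n
instance (n : Int) : Decidable (Pre_find_all_replacements n) := by unfold Pre_find_all_replacements; infer_instance
def pvWitness_find_all_replacements : Int := 7

def Spec_find_all_replacements (n : Int) (out : List (List Int)) : Prop := out = find_all_replacements_alt n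
instance (n : Int) (out : List (List Int)) : Decidable (Spec_find_all_replacements n out) := by unfold Spec_find_all_replacements; infer_instance

-- ===== CLAIM (what is proved, stated in full; the proofs are below) =====
def Claim_equal_find_all_replacements : Prop := ∀ (n : Int), Dom_find_all_replacements n → Pre_find_all_replacements n → Spec_find_all_replacements n (find_all_replacements n)

-- ===== LEMMAS AND PROOFS =====

-- (famB l).1 = value of the unmasked digits in place, (famB l).2 = sum of 10^place over masked places
def famB : List (Bool × Int) → Int × Int
  | [] => (0, 0)
  | bc :: t => ((if bc.1 then 0 else bc.2 * 10 ^ t.length) + (famB t).1,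
                (if bc.1 then 10 ^ t.length else 0) + (famB t).2)

lemma prodTF_length {k : Nat} {i : List Bool} (h : i ∈ prodTF k) : i.length = k := by
  induction k generalizing i with
  | zero => simp [prodTF] at h; simp [h]
  | succ k ih =>
    simp [prodTF] at h
    rcases h with ⟨t, ht, rfl⟩ | ⟨t, ht, rfl⟩ <;> simp [ih ht]

lemma join_nil_flatten (ps : List (List Char)) : PySem.Chars.join [] ps = ps.flatten := by
  induction ps with
  | nil => simp [PySem.Chars.join_nil]
  | cons p ps ih =>
    cases ps with
    | nil => simp [PySem.Chars.join_singleton]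
    | cons q rest => simp [PySem.Chars.join_cons_cons, ih]

lemma toChars_digit {d : Int} (h0 : 0 ≤ d) (h10 : d < 10) :
    PySem.Int.toChars d = [Char.ofNat (48 + d.toNat)] := by
  interval_cases d <;> decide

lemma digitCharVal {d : Int} (h0 : 0 ≤ d) (h10 : d < 10) :
    ((Char.ofNat (48 + d.toNat)).toNat : Int) = 48 + d := by
  interval_cases d <;> decide

lemma digitChar_ne_minus {d : Int} (h0 : 0 ≤ d) (h10 : d < 10) :
    Char.ofNat (48 + d.toNat) ≠ '-' := by
  interval_cases d <;> decide

lemma toDigitsCore_head (fuel : Nat) : ∀ (m : Nat) (acc : List Char), 0 < fuel →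
    ∃ k t, k < 10 ∧ Nat.toDigitsCore 10 fuel m acc = Nat.digitChar k :: t := by
  induction fuel with
  | zero => intro _ _ h; omega
  | succ fuel ih =>
    intro m acc _
    rw [Nat.toDigitsCore]
    by_cases h : m / 10 = 0
    · exact ⟨m % 10, acc, by omega, by simp [h]⟩
    · simp only [h, if_false]
      cases fuel with
      | zero => exact ⟨m % 10, acc, by omega, by rw [Nat.toDigitsCore]⟩
      | succ f => exact ih (m / 10) _ (by omega)

lemma toDigits_head (m : Nat) :
    ∃ k t, k < 10 ∧ Nat.toDigits 10 m = Nat.digitChar k :: t := by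
  rw [Nat.toDigits]
  exact toDigitsCore_head (m + 1) m [] (by omega)

lemma digitChar_ne_minus' {k : Nat} (h : k < 10) : Nat.digitChar k ≠ '-' := by
  interval_cases k <;> decide

-- the index loop of A's inner rewrite, as a pointwise map over the mask/char zip
lemma set_loop_eq (i : List Bool) (r : List Char) :
    ∀ (cs : List (List Char)), cs.length = i.length →
    (List.range i.length).foldl
      (fun a j => if i.getD j false then a.set j r else a) cs
    = (i.zip cs).map (fun bc => if bc.1 then r else bc.2) := by
  induction i with
  | nil =>
    intro cs h
    have : cs = [] := List.eq_nil_of_length_eq_zero (by simpa using h)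
    subst this; rfl
  | cons b i ih =>
    intro cs h
    cases cs with
    | nil => simp at h
    | cons c cs =>
      have h' : cs.length = i.length := by simpa using h
      have hstep : ∀ (js : List Nat) (x : List Char) (xs : List (List Char)),
          js.foldl (fun a j => if i.getD j false then a.set (j + 1) r else a) (x :: xs)
          = x :: js.foldl (fun a j => if i.getD j false then a.set j r else a) xs := by
        intro js
        induction js with
        | nil => intro x xs; rfl
        | cons j js ihj =>
          intro x xs
          simp only [List.foldl_cons, List.set_cons_succ]
          by_cases hb : i.getD j false
          · rw [if_pos hb, if_pos hb, ihj]
          · rw [if_neg hb, if_neg hb, ihj]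
      simp only [List.length_cons, List.range_succ_eq_map, List.foldl_cons, List.foldl_map,
        List.getD_cons_zero, List.getD_cons_succ, List.set_cons_zero]
      cases b
      · rw [if_neg (by decide), hstep, ih cs h']; simp
      · rw [if_pos rfl, hstep, ih cs h']; simp

lemma flatten_map_singleton {α β : Type} (l : List α) (g : α → β) :
    (l.map (fun x => [g x])).flatten = l.map g := by
  induction l with
  | nil => rfl
  | cons x t ih => simp [ih]

-- A's whole rewritten string for mask i and digit d, as one map over the mask/char zip
lemma rs_eq (i : List Bool) (s : List Char) (d : Int) (h0 : 0 ≤ d) (h10 : d < 10)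
    (hlen : i.length = s.length) :
    PySem.Chars.join []
      ((PySem.List.pyRange 0 (i.length : Int)).foldl
        (fun cs j => if PySem.List.pyGetD i j false
          then PySem.List.pySetD cs j (PySem.Int.toChars d) else cs)
        (s.map (fun c => [c])))
    = (i.zip s).map (fun bc => if bc.1 then Char.ofNat (48 + d.toNat) else bc.2) := by
  rw [PySem.List.pyRange_zero_natCast, List.foldl_map]
  simp only [PySem.List.pyGetD_natCast, PySem.List.pySetD_natCast]
  rw [set_loop_eq i _ (s.map (fun c => [c])) (by simpa using hlen.symm)]
  rw [join_nil_flatten, toChars_digit h0 h10, List.zip_map_right, List.map_map]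
  have : ((fun bc => if bc.1 = true then [Char.ofNat (48 + d.toNat)] else bc.2) ∘
      Prod.map id (fun c => [c]))
      = fun (bc : Bool × Char) => [if bc.1 = true then Char.ofNat (48 + d.toNat) else bc.2] := by
    funext bc
    by_cases hb : bc.1 = true <;> simp [hb, Prod.map]
  rw [this, flatten_map_singleton]

-- B's base/M pair fold, in closed form
lemma foldl_step_eq (l : List (Bool × Int)) : ∀ (p : Int × Int),
    l.foldl (fun p bc => if bc.1 then (10 * p.1, 10 * p.2 + 1) else (10 * p.1 + bc.2, 10 * p.2)) p
    = (p.1 * 10 ^ l.length + (famB l).1, p.2 * 10 ^ l.length + (famB l).2) := by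
  induction l with
  | nil => intro p; simp [famB]
  | cons bc t ih =>
    intro p
    simp only [List.foldl_cons, ih, famB, List.length_cons]
    by_cases hb : bc.1 <;> simp [hb] <;> constructor <;> ring

-- A's digit-string value, in terms of the same famB pair
lemma digitsVal_masked {dc : Char} {d : Int} (hdc : ((dc.toNat : Int)) = 48 + d)
    (l : List (Bool × Char)) : ∀ (a : Int),
    (l.map (fun bc => if bc.1 then dc else bc.2)).foldl
        (fun x c => 10 * x + ((c.toNat : Int) - 48)) a
    = a * 10 ^ l.length
      + (famB (l.map (fun bc => (bc.1, ((bc.2.toNat : Int) - 48))))).1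
      + d * (famB (l.map (fun bc => (bc.1, ((bc.2.toNat : Int) - 48))))).2 := by
  induction l with
  | nil => intro a; simp [famB]
  | cons bc t ih =>
    intro a
    simp only [List.map_cons, List.foldl_cons, ih, famB, List.length_map, List.length_cons]
    by_cases hb : bc.1 <;> simp [hb, hdc] <;> ring

-- skip-on-condition fold = append fold over the filtered list
lemma foldl_skip_if {α β : Type} (p : α → Bool) (f : α → β) (l : List α) (acc : List β) :
    l.foldl (fun out x => if p x then out else out ++ [f x]) acc
    = acc ++ (l.filter (fun x => !(p x))).map f := by
  rw [← PySem.List.foldl_append_if (fun x => !(p x)) f l acc]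
  apply PySem.List.foldl_congr_mem
  intro a x _
  cases h : p x <;> simp

-- ===== VERDICT =====
theorem find_all_replacements_spec : Claim_equal_find_all_replacements := by
  intro n _ hpre
  unfold Spec_find_all_replacements
  simp only [find_all_replacements, find_all_replacements_alt, all_locations]
  simp only [PySem.List.foldl_append_if, foldl_skip_if, List.nil_append, List.map_id']
  simp only [PySem.List.foldl_append_singleton_eq_map, List.nil_append]
  apply List.map_congr_left
  intro i hi
  have hspos : PySem.Int.toChars n = Nat.toDigits 10 n.toNat := by
    simp [PySem.Int.toChars, not_lt.mpr hpre]
  obtain ⟨k, t, hk, hdt⟩ := toDigits_head n.toNat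
  have hlen : i.length = (PySem.Int.toChars n).length :=
    prodTF_length (List.mem_of_mem_filter hi)
  apply PySem.List.foldl_congr_mem
  intro acc d hd
  obtain ⟨hd0, hd10⟩ := PySem.List.mem_pyRange_one.mp hd
  congr 1
  rw [rs_eq i _ d hd0 hd10 hlen]
  -- B's pair fold over the zip, as a fold over the (Bool, digit-value) list
  have hmap : (i.zip (PySem.Int.toChars n)).foldl
      (fun p bc => if bc.1 then (10 * p.1, 10 * p.2 + 1)
                   else (10 * p.1 + ((bc.2.toNat : Int) - 48), 10 * p.2)) ((0 : Int), (0 : Int))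
      = ((i.zip (PySem.Int.toChars n)).map
          (fun bc => (bc.1, ((bc.2.toNat : Int) - 48)))).foldl
        (fun p bc => if bc.1 then (10 * p.1, 10 * p.2 + 1)
                     else (10 * p.1 + bc.2, 10 * p.2)) ((0 : Int), (0 : Int)) := by
    rw [List.foldl_map]
  rw [hmap, foldl_step_eq]
  have hdcne := digitChar_ne_minus hd0 hd10
  have hdcv := digitCharVal hd0 hd10
  rw [hspos, hdt] at hlen ⊢
  cases i with
  | nil => simp at hlen
  | cons b0 i' =>
    have hkne := digitChar_ne_minus' hk
    have hhead : ¬ ((((b0 :: i').zip (Nat.digitChar k :: t)).map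
        (fun bc => if bc.1 = true then Char.ofNat (48 + d.toNat) else bc.2)).headD ' ' = '-') := by
      cases b0 <;> simp [hdcne, hkne]
    unfold pyIntDigits
    rw [if_neg hhead]
    unfold digitsVal
    rw [digitsVal_masked hdcv]
    simp [zero_mul, zero_add]
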